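-- pv_equiv track=rewrite | github.com/pr1m8/haive-games | scripts/add_docstrings.py | generate_param_description
-- ===== SOURCE A (Python) =====
-- def generate_param_description(
--     param_name: str, func_name: str, module_name: str
-- ) -> str:
--     """Generate a description for a function parameter based on its name.
--
--     Args:
--         param_name: Name of the parameter.
--         func_name: Name of the function containing the parameter.
--         module_name: Name of the module.
--
--     Returns:
--         A description string for the parameter.
--     """
--     display_name = " ".join(
--         word.capitalize() for word in module_name.replace("_", " ").split()
--     )
--
--     # Common parameter names and their descriptions
--     param_descriptions = {
--         "state": f"Current {display_name} game state.",
--         "move": f"The move to apply to the {display_name} game.",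
--         "player": "The player making the move or taking the action.",
--         "player_id": "Identifier for the player.",
--         "config": f"Configuration settings for the {display_name} game.",
--         "board": f"The {display_name} game board.",
--         "position": "Position coordinates on the game board.",
--         "game": f"The {display_name} game instance.",
--         "visualize": "Whether to display visualization of the game.",
--         "verbose": "Whether to output detailed progress information.",
--         "timeout": "Maximum time allowed for the operation.",
--         "max_steps": "Maximum number of steps or moves allowed.",
--         "seed": "Random seed for reproducibility.",
--         "engine": "The engine to use for AI operations.",
--         "analysis": "Game position analysis data.",
--     }
--
--     # Check for common parameter prefixes/suffixes
--     if param_name.endswith("_state"):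
--         return f"State information for {param_name[:-6]}."
--     if param_name.endswith("_config"):
--         return f"Configuration for {param_name[:-7]}."
--     if param_name.endswith("_id"):
--         return f"Identifier for {param_name[:-3]}."
--     if param_name.endswith("_name"):
--         return f"Name of the {param_name[:-5]}."
--     if param_name.endswith("_path"):
--         return f"Path to the {param_name[:-5]}."
--     if param_name.endswith("_file"):
--         return f"File containing {param_name[:-5]} data."
--     if param_name.endswith("_dir"):
--         return f"Directory containing {param_name[:-4]} data."
--     if param_name.startswith("max_"):
--         return f"Maximum value for {param_name[4:]}."
--     if param_name.startswith("min_"):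
--         return f"Minimum value for {param_name[4:]}."
--     if param_name.startswith("num_"):
--         return f"Number of {param_name[4:]}."
--
--     # Return from common parameter descriptions or a generic description
--     return param_descriptions.get(
--         param_name, f"The {param_name.replace('_', ' ')} for the operation."
--     )
-- ===== SOURCE B (Python) =====
-- _SUFFIX = {
--     "state": "State information for {}.",
--     "config": "Configuration for {}.",
--     "id": "Identifier for {}.",
--     "name": "Name of the {}.",
--     "path": "Path to the {}.",
--     "file": "File containing {} data.",
--     "dir": "Directory containing {} data.",
-- }
--
-- _PREFIX = {
--     "max": "Maximum value for {}.",
--     "min": "Minimum value for {}.",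
--     "num": "Number of {}.",
-- }
--
--
-- def generate_param_description(
--     param_name: str, func_name: str, module_name: str
-- ) -> str:
--     """Generate a description for a function parameter based on its name."""
--     # Split once at the last underscore: the part after it is the candidate
--     # suffix keyword (suffix rules have priority over prefix rules).
--     head, sep, tail = param_name.rpartition("_")
--     if sep and tail in _SUFFIX:
--         return _SUFFIX[tail].format(head)
--
--     # Split once at the first underscore: the part before it is the candidate
--     # prefix keyword.
--     head, sep, tail = param_name.partition("_")
--     if sep and head in _PREFIX:
--         return _PREFIX[head].format(tail)
--
--     display_name = " ".join(
--         word.capitalize() for word in module_name.replace("_", " ").split()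
--     )
--     canned = {
--         "state": f"Current {display_name} game state.",
--         "move": f"The move to apply to the {display_name} game.",
--         "player": "The player making the move or taking the action.",
--         "player_id": "Identifier for the player.",
--         "config": f"Configuration settings for the {display_name} game.",
--         "board": f"The {display_name} game board.",
--         "position": "Position coordinates on the game board.",
--         "game": f"The {display_name} game instance.",
--         "visualize": "Whether to display visualization of the game.",
--         "verbose": "Whether to output detailed progress information.",
--         "timeout": "Maximum time allowed for the operation.",
--         "max_steps": "Maximum number of steps or moves allowed.",
--         "seed": "Random seed for reproducibility.",
--         "engine": "The engine to use for AI operations.",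
--         "analysis": "Game position analysis data.",
--     }
--     return canned.get(
--         param_name, f"The {param_name.replace('_', ' ')} for the operation."
--     )
-- ===== Notes on version B (the rewrite author's own statement) =====
-- stated objective: alternative
-- what changed: Instead of A's ten hard-coded endswith/startswith scans, B splits param_name once at its last underscore (rpartition) and looks the tail up in a suffix-keyword table, then once at its first underscore (partition) and looks the head up in a prefix-keyword table, falling back to the canned-name dict; correctness relies on '_suffix'/'prefix_' matches being exactly determined by the last/first underscore split.
import Mathlib
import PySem

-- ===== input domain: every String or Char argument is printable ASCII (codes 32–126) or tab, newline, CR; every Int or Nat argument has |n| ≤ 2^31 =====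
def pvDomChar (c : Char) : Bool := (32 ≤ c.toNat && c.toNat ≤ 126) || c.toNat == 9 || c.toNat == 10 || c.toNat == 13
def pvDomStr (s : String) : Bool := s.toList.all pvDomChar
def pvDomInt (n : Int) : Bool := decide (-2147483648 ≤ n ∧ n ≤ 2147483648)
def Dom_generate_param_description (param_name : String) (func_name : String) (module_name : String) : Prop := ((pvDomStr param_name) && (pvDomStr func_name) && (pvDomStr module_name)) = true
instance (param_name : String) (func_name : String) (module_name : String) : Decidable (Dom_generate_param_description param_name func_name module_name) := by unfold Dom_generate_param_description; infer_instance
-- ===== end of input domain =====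

-- B replaces A's ten-branch affix if-chain by two single-split passes: one
-- rpartition at the last '_' with a suffix-keyword table, then one partition at
-- the first '_' with a prefix-keyword table (objective: alternative).

-- str.capitalize() for one word (exact on the ASCII domain): first char uppercased, rest lowercased
def pvCapitalize (w : String) : String :=
  String.ofList (match w.toList with
    | [] => []
    | c :: rest => PySem.Chars.upperChar c :: rest.map PySem.Chars.lowerChar)

-- display_name = " ".join(word.capitalize() for word in module_name.replace("_", " ").split())
def pvDisplayName (module_name : String) : String :=
  PySem.Str.join " " ((PySem.Str.split₀ (PySem.Str.replace module_name "_" " ")).map pvCapitalize)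

-- the param_descriptions dict (the same literal appears in A and in B's fallback)
def pvCanned (display_name : String) : PySem.Dict String String :=
  PySem.Dict.mk [
    ("state", "Current " ++ display_name ++ " game state."),
    ("move", "The move to apply to the " ++ display_name ++ " game."),
    ("player", "The player making the move or taking the action."),
    ("player_id", "Identifier for the player."),
    ("config", "Configuration settings for the " ++ display_name ++ " game."),
    ("board", "The " ++ display_name ++ " game board."),
    ("position", "Position coordinates on the game board."),
    ("game", "The " ++ display_name ++ " game instance."),
    ("visualize", "Whether to display visualization of the game."),
    ("verbose", "Whether to output detailed progress information."),
    ("timeout", "Maximum time allowed for the operation."),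
    ("max_steps", "Maximum number of steps or moves allowed."),
    ("seed", "Random seed for reproducibility."),
    ("engine", "The engine to use for AI operations."),
    ("analysis", "Game position analysis data.")]

-- ===== PORT A =====
def generate_param_description (param_name : String) (func_name : String) (module_name : String) : String :=
  let display_name := pvDisplayName module_name
  let param_descriptions := pvCanned display_name
  if PySem.Str.endswith param_name "_state" then
    "State information for " ++ PySem.Str.slice param_name none (some (-6)) ++ "."
  else if PySem.Str.endswith param_name "_config" then
    "Configuration for " ++ PySem.Str.slice param_name none (some (-7)) ++ "."
  else if PySem.Str.endswith param_name "_id" then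
    "Identifier for " ++ PySem.Str.slice param_name none (some (-3)) ++ "."
  else if PySem.Str.endswith param_name "_name" then
    "Name of the " ++ PySem.Str.slice param_name none (some (-5)) ++ "."
  else if PySem.Str.endswith param_name "_path" then
    "Path to the " ++ PySem.Str.slice param_name none (some (-5)) ++ "."
  else if PySem.Str.endswith param_name "_file" then
    "File containing " ++ PySem.Str.slice param_name none (some (-5)) ++ " data."
  else if PySem.Str.endswith param_name "_dir" then
    "Directory containing " ++ PySem.Str.slice param_name none (some (-4)) ++ " data."
  else if PySem.Str.startswith param_name "max_" then
    "Maximum value for " ++ PySem.Str.slice param_name (some 4) none ++ "."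
  else if PySem.Str.startswith param_name "min_" then
    "Minimum value for " ++ PySem.Str.slice param_name (some 4) none ++ "."
  else if PySem.Str.startswith param_name "num_" then
    "Number of " ++ PySem.Str.slice param_name (some 4) none ++ "."
  else
    param_descriptions.getD param_name
      ("The " ++ PySem.Str.replace param_name "_" " " ++ " for the operation.")

-- ===== PORT B =====
-- str.partition('_') on a char list (exact): scan to the FIRST '_';
-- some (head, tail) when found, none when absent (Python's empty sep part).
-- Source B's rpartition('_') is this same scan run on the reversed list.
def pvPartGo (acc : List Char) : List Char → Option (List Char × List Char)
  | [] => none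
  | c :: r => if c = '_' then some (acc.reverse, r) else pvPartGo (c :: acc) r

-- _SUFFIX: suffix keyword -> (text before the stem, text after it)
def pvSuffixDict : PySem.Dict (List Char) (String × String) :=
  PySem.Dict.mk [
    ("state".toList, ("State information for ", ".")),
    ("config".toList, ("Configuration for ", ".")),
    ("id".toList, ("Identifier for ", ".")),
    ("name".toList, ("Name of the ", ".")),
    ("path".toList, ("Path to the ", ".")),
    ("file".toList, ("File containing ", " data.")),
    ("dir".toList, ("Directory containing ", " data."))]

-- _PREFIX: prefix keyword -> (text before the stem, text after it)
def pvPrefixDict : PySem.Dict (List Char) (String × String) :=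
  PySem.Dict.mk [
    ("max".toList, ("Maximum value for ", ".")),
    ("min".toList, ("Minimum value for ", ".")),
    ("num".toList, ("Number of ", "."))]

-- the canned-dict / generic-sentence fallback (last lines of Source B)
def pvFallback (param_name : String) (module_name : String) : String :=
  let display_name := pvDisplayName module_name
  (pvCanned display_name).getD param_name
    ("The " ++ PySem.Str.replace param_name "_" " " ++ " for the operation.")

-- second stage of Source B: partition at the first '_', look the head up in _PREFIX
def pvPrefixStage (param_name : String) (module_name : String) : String :=
  match pvPartGo [] param_name.toList with
  | some (h, t) =>
    match pvPrefixDict.get? h with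
    | some (bef, aft) => bef ++ String.ofList t ++ aft
    | none => pvFallback param_name module_name
  | none => pvFallback param_name module_name

def generate_param_description_alt (param_name : String) (func_name : String) (module_name : String) : String :=
  -- head, sep, tail = param_name.rpartition("_"): scan the reversed list for the
  -- first '_' (tr = tail reversed, hr = head reversed)
  match pvPartGo [] param_name.toList.reverse with
  | some (tr, hr) =>
    match pvSuffixDict.get? tr.reverse with
    | some (bef, aft) => bef ++ String.ofList hr.reverse ++ aft
    | none => pvPrefixStage param_name module_name
  | none => pvPrefixStage param_name module_name

-- ===== PRECONDITION & SPEC =====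
def Spec_generate_param_description (param_name : String) (func_name : String) (module_name : String) (out : String) : Prop := out = generate_param_description_alt param_name func_name module_name
instance (param_name : String) (func_name : String) (module_name : String) (out : String) : Decidable (Spec_generate_param_description param_name func_name module_name out) := by unfold Spec_generate_param_description; infer_instance

-- ===== CLAIM (what is proved, stated in full; the proofs are below) =====
def Claim_equal_generate_param_description : Prop := ∀ (param_name : String) (func_name : String) (module_name : String), Dom_generate_param_description param_name func_name module_name → Spec_generate_param_description param_name func_name module_name (generate_param_description param_name func_name module_name)

-- ===== LEMMAS AND PROOFS =====

-- pvPartGo returns none exactly when '_' does not occur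
theorem pvPartGo_none_iff (r : List Char) : ∀ acc, pvPartGo acc r = none ↔ '_' ∉ r := by
  induction r with
  | nil => intro acc; simp [pvPartGo]
  | cons c r ih =>
    intro acc
    by_cases hc : c = '_'
    · subst hc; simp [pvPartGo]
    · have hc' : '_' ≠ c := fun h => hc h.symm
      simp [pvPartGo, hc, ih, hc']

-- constructing pvPartGo's value at the first '_'
theorem pvPartGo_append (pre rest : List Char) (hpre : '_' ∉ pre) :
    ∀ acc, pvPartGo acc (pre ++ '_' :: rest) = some (acc.reverse ++ pre, rest) := by
  induction pre with
  | nil => intro acc; simp [pvPartGo]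
  | cons c pre ih =>
    intro acc
    have hc : c ≠ '_' := fun h => hpre (by simp [h])
    have hpre' : '_' ∉ pre := fun h => hpre (by simp [h])
    simp [pvPartGo, hc, ih hpre']

-- inversion: a some answer exhibits the first '_'
theorem pvPartGo_some (r : List Char) :
    ∀ acc x y, pvPartGo acc r = some (x, y) →
      ∃ pre, '_' ∉ pre ∧ r = pre ++ '_' :: y ∧ x = acc.reverse ++ pre := by
  induction r with
  | nil => intro acc x y h; simp [pvPartGo] at h
  | cons c r ih =>
    intro acc x y h
    by_cases hc : c = '_'
    · subst hc
      simp [pvPartGo] at h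
      exact ⟨[], by simp, by simp [h.2], by simp [h.1]⟩
    · simp [pvPartGo, hc] at h
      obtain ⟨pre, hpre, hr, hx⟩ := ih (c :: acc) x y h
      have hc' : '_' ≠ c := fun h => hc h.symm
      exact ⟨c :: pre, by simp [hpre, hc'], by simp [hr], by simpa using hx⟩

-- endswith("_" + w) decided by the rpartition tail
theorem endswith_char (p : String) (tr hr : List Char)
    (hpg : pvPartGo [] p.toList.reverse = some (tr, hr))
    (w' : String) (w : List Char) (hww : w'.toList = '_' :: w) (hw : '_' ∉ w) :
    PySem.Str.endswith p w' = decide (tr.reverse = w) := by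
  rw [PySem.Str.endswith_eq, hww]
  by_cases hx : tr.reverse = w
  · obtain ⟨pre, hpre, hr', hx'⟩ := pvPartGo_some _ _ _ _ hpg
    simp at hx'
    subst hx'
    have hp : p.toList = hr.reverse ++ '_' :: w := by
      have := congrArg List.reverse hr'
      simpa [hx] using this
    rw [decide_eq_true hx, (PySem.Chars.endswith_iff _ _)]
    exact ⟨hr.reverse, hp.symm⟩
  · rw [decide_eq_false hx, Bool.eq_false_iff]
    intro hsuf
    rw [PySem.Chars.endswith_iff] at hsuf
    obtain ⟨z, hz⟩ := hsuf
    have : pvPartGo [] p.toList.reverse = some (w.reverse, z.reverse) := by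
      have hrv : p.toList.reverse = w.reverse ++ '_' :: z.reverse := by
        rw [← hz]; simp
      rw [hrv]
      simpa using pvPartGo_append w.reverse z.reverse (by simpa using hw) []
    rw [hpg] at this
    simp at this
    exact hx (by rw [this.1]; simp)

-- endswith("_" + w) is false when the name has no '_'
theorem endswith_none (p : String) (hn : '_' ∉ p.toList)
    (w' : String) (w : List Char) (hww : w'.toList = '_' :: w) :
    PySem.Str.endswith p w' = false := by
  rw [PySem.Str.endswith_eq, hww, Bool.eq_false_iff]
  intro hsuf
  rw [PySem.Chars.endswith_iff] at hsuf
  obtain ⟨z, hz⟩ := hsuf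
  exact hn (by rw [← hz]; simp)

-- startswith(w + "_") decided by the partition head
theorem startswith_char (p : String) (h t : List Char)
    (hpg : pvPartGo [] p.toList = some (h, t))
    (w' : String) (w : List Char) (hww : w'.toList = w ++ ['_']) (hw : '_' ∉ w) :
    PySem.Str.startswith p w' = decide (h = w) := by
  rw [PySem.Str.startswith_eq, hww]
  obtain ⟨pre, hpre, hr', hx'⟩ := pvPartGo_some _ _ _ _ hpg
  have hxp : h = pre := by simpa using hx'
  subst hxp
  by_cases hx : h = w
  · subst hx
    rw [decide_eq_true rfl, (PySem.Chars.startswith_iff _ _)]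
    exact ⟨t, by rw [hr']; simp⟩
  · rw [decide_eq_false hx, Bool.eq_false_iff]
    intro hpref
    rw [PySem.Chars.startswith_iff] at hpref
    obtain ⟨z, hz⟩ := hpref
    have : pvPartGo [] p.toList = some (w, z) := by
      rw [← hz]
      simpa using pvPartGo_append w z hw []
    rw [hpg] at this
    simp at this
    exact hx this.1

-- startswith(w + "_") is false when the name has no '_'
theorem startswith_none (p : String) (hn : '_' ∉ p.toList)
    (w' : String) (w : List Char) (hww : w'.toList = w ++ ['_']) :
    PySem.Str.startswith p w' = false := by
  rw [PySem.Str.startswith_eq, hww, Bool.eq_false_iff]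
  intro hpref
  rw [PySem.Chars.startswith_iff] at hpref
  obtain ⟨z, hz⟩ := hpref
  exact hn (by rw [← hz]; simp)

-- the stem kept by take under an append decomposition
theorem take_stem (y w : List Char) (k : Nat) (hkw : w.length + 1 = k) :
    List.take ((y ++ '_' :: w).length - k) (y ++ '_' :: w) = y := by
  have hlen : (y ++ '_' :: w).length - k = y.length := by simp; omega
  rw [hlen, List.take_left]

-- param_name[4:] under the first-'_' decomposition with a 3-char head
theorem drop_stem (p : String) (h t : List Char) (hh : h.length = 3)
    (hl : p.toList = h ++ '_' :: t) :
    PySem.Str.slice p (some 4) none = String.ofList t := by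
  refine congrArg String.ofList ?_
  rw [PySem.Chars.slice_eq_listSlice, PySem.List.slice_from (a := 4) _ (by norm_num), hl]
  have h4 : Int.toNat 4 = h.length + 1 := by omega
  rw [h4, List.drop_append]
  simp

-- ===== VERDICT (by name: the statement is the Claim_ definition above) =====
set_option maxHeartbeats 4000000 in
theorem generate_param_description_spec : Claim_equal_generate_param_description := by
  intro p f m _
  unfold Spec_generate_param_description generate_param_description generate_param_description_alt
  cases hpg : pvPartGo [] p.toList.reverse with
  | none =>
    have hn : '_' ∉ p.toList := by
      have := (pvPartGo_none_iff _ []).mp hpg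
      simpa using this
    have hpg2 : pvPartGo [] p.toList = none := (pvPartGo_none_iff _ []).mpr hn
    rw [endswith_none p hn "_state" "state".toList rfl,
        endswith_none p hn "_config" "config".toList rfl,
        endswith_none p hn "_id" "id".toList rfl,
        endswith_none p hn "_name" "name".toList rfl,
        endswith_none p hn "_path" "path".toList rfl,
        endswith_none p hn "_file" "file".toList rfl,
        endswith_none p hn "_dir" "dir".toList rfl,
        startswith_none p hn "max_" "max".toList rfl,
        startswith_none p hn "min_" "min".toList rfl,
        startswith_none p hn "num_" "num".toList rfl]
    dsimp only [pvPrefixStage]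
    rw [hpg2]
    rfl
  | some pr =>
    obtain ⟨tr, hr⟩ := pr
    obtain ⟨pre, hpre, hrev, hx⟩ := pvPartGo_some _ _ _ _ hpg
    have hxp : tr = pre := by simpa using hx
    subst hxp
    have hl : p.toList = hr.reverse ++ '_' :: tr.reverse := by
      have := congrArg List.reverse hrev
      simpa using this
    rw [endswith_char p tr hr hpg "_state" "state".toList rfl (by decide),
        endswith_char p tr hr hpg "_config" "config".toList rfl (by decide),
        endswith_char p tr hr hpg "_id" "id".toList rfl (by decide),
        endswith_char p tr hr hpg "_name" "name".toList rfl (by decide),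
        endswith_char p tr hr hpg "_path" "path".toList rfl (by decide),
        endswith_char p tr hr hpg "_file" "file".toList rfl (by decide),
        endswith_char p tr hr hpg "_dir" "dir".toList rfl (by decide)]
    dsimp only []
    by_cases h1 : tr.reverse = "state".toList
    · have hs : PySem.Str.slice p none (some (-6)) = String.ofList hr.reverse := by
        simp only [PySem.Str.slice]
        refine congrArg String.ofList ?_
        rw [PySem.Chars.slice_eq_listSlice, hl, h1, PySem.List.slice_to_neg_ofNat _ 6 (by omega)]
        exact take_stem _ _ _ (by decide)
      have hg : pvSuffixDict.get? tr.reverse = some ("State information for ", ".") := by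
        rw [h1]
        rfl
      rw [decide_eq_true h1, hs, hg]
      rfl
    by_cases h2 : tr.reverse = "config".toList
    · have hs : PySem.Str.slice p none (some (-7)) = String.ofList hr.reverse := by
        simp only [PySem.Str.slice]
        refine congrArg String.ofList ?_
        rw [PySem.Chars.slice_eq_listSlice, hl, h2, PySem.List.slice_to_neg_ofNat _ 7 (by omega)]
        exact take_stem _ _ _ (by decide)
      have hg : pvSuffixDict.get? tr.reverse = some ("Configuration for ", ".") := by
        rw [h2]
        rfl
      rw [decide_eq_false h1, decide_eq_true h2, hs, hg]
      rfl
    by_cases h3 : tr.reverse = "id".toList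
    · have hs : PySem.Str.slice p none (some (-3)) = String.ofList hr.reverse := by
        simp only [PySem.Str.slice]
        refine congrArg String.ofList ?_
        rw [PySem.Chars.slice_eq_listSlice, hl, h3, PySem.List.slice_to_neg_ofNat _ 3 (by omega)]
        exact take_stem _ _ _ (by decide)
      have hg : pvSuffixDict.get? tr.reverse = some ("Identifier for ", ".") := by
        rw [h3]
        rfl
      rw [decide_eq_false h1, decide_eq_false h2, decide_eq_true h3, hs, hg]
      rfl
    by_cases h4 : tr.reverse = "name".toList
    · have hs : PySem.Str.slice p none (some (-5)) = String.ofList hr.reverse := by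
        simp only [PySem.Str.slice]
        refine congrArg String.ofList ?_
        rw [PySem.Chars.slice_eq_listSlice, hl, h4, PySem.List.slice_to_neg_ofNat _ 5 (by omega)]
        exact take_stem _ _ _ (by decide)
      have hg : pvSuffixDict.get? tr.reverse = some ("Name of the ", ".") := by
        rw [h4]
        rfl
      rw [decide_eq_false h1, decide_eq_false h2, decide_eq_false h3, decide_eq_true h4, hs, hg]
      rfl
    by_cases h5 : tr.reverse = "path".toList
    · have hs : PySem.Str.slice p none (some (-5)) = String.ofList hr.reverse := by
        simp only [PySem.Str.slice]
        refine congrArg String.ofList ?_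
        rw [PySem.Chars.slice_eq_listSlice, hl, h5, PySem.List.slice_to_neg_ofNat _ 5 (by omega)]
        exact take_stem _ _ _ (by decide)
      have hg : pvSuffixDict.get? tr.reverse = some ("Path to the ", ".") := by
        rw [h5]
        rfl
      rw [decide_eq_false h1, decide_eq_false h2, decide_eq_false h3, decide_eq_false h4, decide_eq_true h5, hs, hg]
      rfl
    by_cases h6 : tr.reverse = "file".toList
    · have hs : PySem.Str.slice p none (some (-5)) = String.ofList hr.reverse := by
        simp only [PySem.Str.slice]
        refine congrArg String.ofList ?_
        rw [PySem.Chars.slice_eq_listSlice, hl, h6, PySem.List.slice_to_neg_ofNat _ 5 (by omega)]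
        exact take_stem _ _ _ (by decide)
      have hg : pvSuffixDict.get? tr.reverse = some ("File containing ", " data.") := by
        rw [h6]
        rfl
      rw [decide_eq_false h1, decide_eq_false h2, decide_eq_false h3, decide_eq_false h4, decide_eq_false h5, decide_eq_true h6, hs, hg]
      rfl
    by_cases h7 : tr.reverse = "dir".toList
    · have hs : PySem.Str.slice p none (some (-4)) = String.ofList hr.reverse := by
        simp only [PySem.Str.slice]
        refine congrArg String.ofList ?_
        rw [PySem.Chars.slice_eq_listSlice, hl, h7, PySem.List.slice_to_neg_ofNat _ 4 (by omega)]
        exact take_stem _ _ _ (by decide)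
      have hg : pvSuffixDict.get? tr.reverse = some ("Directory containing ", " data.") := by
        rw [h7]
        rfl
      rw [decide_eq_false h1, decide_eq_false h2, decide_eq_false h3, decide_eq_false h4, decide_eq_false h5, decide_eq_false h6, decide_eq_true h7, hs, hg]
      rfl
    -- no suffix keyword matches: the dict lookup fails and both move on
    have b1 : (("state".toList : List Char) == tr.reverse) = false :=
      beq_eq_false_iff_ne.mpr (fun hq => h1 hq.symm)
    have b2 : (("config".toList : List Char) == tr.reverse) = false :=
      beq_eq_false_iff_ne.mpr (fun hq => h2 hq.symm)
    have b3 : (("id".toList : List Char) == tr.reverse) = false :=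
      beq_eq_false_iff_ne.mpr (fun hq => h3 hq.symm)
    have b4 : (("name".toList : List Char) == tr.reverse) = false :=
      beq_eq_false_iff_ne.mpr (fun hq => h4 hq.symm)
    have b5 : (("path".toList : List Char) == tr.reverse) = false :=
      beq_eq_false_iff_ne.mpr (fun hq => h5 hq.symm)
    have b6 : (("file".toList : List Char) == tr.reverse) = false :=
      beq_eq_false_iff_ne.mpr (fun hq => h6 hq.symm)
    have b7 : (("dir".toList : List Char) == tr.reverse) = false :=
      beq_eq_false_iff_ne.mpr (fun hq => h7 hq.symm)
    have hget : pvSuffixDict.get? tr.reverse = none := by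
      simp only [pvSuffixDict, PySem.Dict.get?_mk_cons, b1, b2, b3, b4, b5, b6, b7,
                 Bool.false_eq_true, if_false]
      rfl
    rw [hget]
    cases hpg2 : pvPartGo [] p.toList with
    | none =>
      exfalso
      have := (pvPartGo_none_iff _ []).mp hpg2
      exact this (by rw [hl]; simp)
    | some ht =>
      obtain ⟨h, t⟩ := ht
      obtain ⟨pre2, hpre2, hl2, hx2⟩ := pvPartGo_some _ _ _ _ hpg2
      have hxp2 : h = pre2 := by simpa using hx2
      subst hxp2
      have hl2' : p.toList = h ++ '_' :: t := hl2
      rw [startswith_char p h t hpg2 "max_" "max".toList rfl (by decide),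
          startswith_char p h t hpg2 "min_" "min".toList rfl (by decide),
          startswith_char p h t hpg2 "num_" "num".toList rfl (by decide)]
      dsimp only [pvPrefixStage]
      by_cases g1 : h = "max".toList
      · have hd : PySem.Str.slice p (some 4) none = String.ofList t :=
          drop_stem p "max".toList t (by decide) (by rw [← g1]; exact hl2')
        have hgp : pvPrefixDict.get? h = some ("Maximum value for ", ".") := by
          rw [g1]
          rfl
        rw [decide_eq_false h1, decide_eq_false h2, decide_eq_false h3, decide_eq_false h4, decide_eq_false h5, decide_eq_false h6, decide_eq_false h7, decide_eq_true g1, hd, hpg2]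
        dsimp only []
        rw [hgp]
        rfl
      by_cases g2 : h = "min".toList
      · have hd : PySem.Str.slice p (some 4) none = String.ofList t :=
          drop_stem p "min".toList t (by decide) (by rw [← g2]; exact hl2')
        have hgp : pvPrefixDict.get? h = some ("Minimum value for ", ".") := by
          rw [g2]
          rfl
        rw [decide_eq_false h1, decide_eq_false h2, decide_eq_false h3, decide_eq_false h4, decide_eq_false h5, decide_eq_false h6, decide_eq_false h7, decide_eq_false g1, decide_eq_true g2, hd, hpg2]
        dsimp only []
        rw [hgp]
        rfl
      by_cases g3 : h = "num".toList
      · have hd : PySem.Str.slice p (some 4) none = String.ofList t :=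
          drop_stem p "num".toList t (by decide) (by rw [← g3]; exact hl2')
        have hgp : pvPrefixDict.get? h = some ("Number of ", ".") := by
          rw [g3]
          rfl
        rw [decide_eq_false h1, decide_eq_false h2, decide_eq_false h3, decide_eq_false h4, decide_eq_false h5, decide_eq_false h6, decide_eq_false h7, decide_eq_false g1, decide_eq_false g2, decide_eq_true g3, hd, hpg2]
        dsimp only []
        rw [hgp]
        rfl
      -- no prefix keyword either: both fall back to the canned dict
      have c1 : (("max".toList : List Char) == h) = false :=
        beq_eq_false_iff_ne.mpr (fun hq => g1 hq.symm)
      have c2 : (("min".toList : List Char) == h) = false :=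
        beq_eq_false_iff_ne.mpr (fun hq => g2 hq.symm)
      have c3 : (("num".toList : List Char) == h) = false :=
        beq_eq_false_iff_ne.mpr (fun hq => g3 hq.symm)
      have hget2 : pvPrefixDict.get? h = none := by
        simp only [pvPrefixDict, PySem.Dict.get?_mk_cons, c1, c2, c3,
                   Bool.false_eq_true, if_false]
        rfl
      rw [decide_eq_false h1, decide_eq_false h2, decide_eq_false h3, decide_eq_false h4, decide_eq_false h5, decide_eq_false h6, decide_eq_false h7, decide_eq_false g1, decide_eq_false g2, decide_eq_false g3, hpg2]
      dsimp only []
      rw [hget2]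
      rfl
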